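-- pv_equiv track=rewrite | github.com/uvsq21800801/Interface_Graphique_TER | Solving/nx_convert.py | convert_combi
-- ===== SOURCE A (Python) =====
-- def convert_combi(matrix_bonds, tab_atom, combi):
--     # initialise les sorties
--     new_matrix_bonds = []
--     new_tab_atom = []
--     # pour tous les sommets du graphe original
--     for i in range(0, len(combi)):
--         # s'il appartienne au sous-graphe
--         if int(combi[i])==1:
--             # copie des caractéristiques
--             new_tab_atom.append(tab_atom[i])
--             line_bonds = []
--             # copie des liaisons avec d'autres sommets du sous-graphe
--             for j in range(0, len(combi)):
--                 if int(combi[j])==1: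
--                     line_bonds.append(matrix_bonds[i][j])
--             new_matrix_bonds.append(line_bonds)
--     return new_matrix_bonds, new_tab_atom
-- ===== SOURCE B (Python) =====
-- def convert_combi(matrix_bonds, tab_atom, combi):
--     # Double-transpose approach: select the kept rows by zipping with the mask,
--     # transpose with zip(*...), select the kept columns the same way (as rows of
--     # the transpose), and transpose back.  No index arithmetic, no rescans of combi.
--     def keep(items):
--         return [x for x, c in zip(items, combi) if int(c) == 1]
--     rows = keep(matrix_bonds)
--     cols = keep(zip(*rows))
--     new_matrix_bonds = [list(t) for t in zip(*cols)]
--     return new_matrix_bonds, keep(tab_atom)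
-- ===== Notes on version B (the rewrite author's own statement) =====
-- stated objective: alternative
-- what changed: B replaces A's indexed nested loops by an index-free double-transpose: select the kept rows by zipping each list with the mask, transpose with zip(*...), select the kept columns the same way, and transpose back.
import Mathlib
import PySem

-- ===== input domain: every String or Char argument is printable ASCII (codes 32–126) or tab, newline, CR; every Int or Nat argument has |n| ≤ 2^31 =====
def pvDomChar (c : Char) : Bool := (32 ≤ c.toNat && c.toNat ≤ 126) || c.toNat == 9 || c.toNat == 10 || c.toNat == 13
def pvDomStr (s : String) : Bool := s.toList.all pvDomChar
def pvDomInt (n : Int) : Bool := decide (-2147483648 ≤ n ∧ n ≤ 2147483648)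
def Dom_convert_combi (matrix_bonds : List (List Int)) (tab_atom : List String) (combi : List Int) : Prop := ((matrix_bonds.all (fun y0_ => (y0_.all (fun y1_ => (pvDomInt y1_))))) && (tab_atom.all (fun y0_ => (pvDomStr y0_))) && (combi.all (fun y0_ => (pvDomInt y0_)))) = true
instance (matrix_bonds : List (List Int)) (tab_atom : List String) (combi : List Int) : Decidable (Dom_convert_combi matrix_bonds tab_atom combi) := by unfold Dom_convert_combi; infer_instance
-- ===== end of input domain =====

-- B replaces A's indexed nested loops by mask-zipping and a double transpose (zip(*...)):
-- an alternative, index-free formulation of the same submatrix extraction.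

-- ===== PORT A =====
-- literal port of A: fold over range(len(combi)), appending the selected atom and a row
-- built by an inner fold over range(len(combi)).  Out-of-range indexing (Python IndexError)
-- is excluded by Pre_; the getD defaults are never reached inside Pre_.
def convert_combi (matrix_bonds : List (List Int)) (tab_atom : List String) (combi : List Int) : List (List Int) × List String :=
  let st := (List.range combi.length).foldl
    (fun (st : List (List Int) × List String) i =>
      if combi.getD i 0 = 1 then
        let line_bonds := (List.range combi.length).foldl
          (fun (acc : List Int) j =>
            if combi.getD j 0 = 1 then acc ++ [(matrix_bonds.getD i []).getD j 0] else acc) []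
        (st.1 ++ [line_bonds], st.2 ++ [tab_atom.getD i ""])
      else st)
    ([], [])
  (st.1, st.2)

-- ===== PORT B =====
-- '[x for x, c in zip(items, combi) if int(c) == 1]' (int() is the identity on ints)
def pvKeep {α : Type} (items : List α) (combi : List Int) : List α :=
  (items.zip combi).filterMap (fun p => if p.2 = 1 then some p.1 else none)

-- exact model of Python's 'list(zip(*rs))': the number of columns is the minimum row
-- length (0 when rs = []); the getD default is never reached for j below that minimum.
def pvMinLen (rs : List (List Int)) : Nat :=
  match rs with
  | [] => 0
  | r :: rest => rest.foldl (fun m r' => min m r'.length) r.length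

def pvTranspose (rs : List (List Int)) : List (List Int) :=
  (List.range (pvMinLen rs)).map (fun j => rs.map (fun r => r.getD j 0))

def convert_combi_alt (matrix_bonds : List (List Int)) (tab_atom : List String) (combi : List Int) : List (List Int) × List String :=
  let rows := pvKeep matrix_bonds combi
  let cols := pvKeep (pvTranspose rows) combi
  (pvTranspose cols, pvKeep tab_atom combi)

-- ===== PRECONDITION & SPEC =====
-- Pre_ excludes exactly the inputs on which Python A raises IndexError: a selected index i
-- must be a valid index into tab_atom and matrix_bonds, and every selected j a valid index
-- into row i.
def Pre_convert_combi (matrix_bonds : List (List Int)) (tab_atom : List String) (combi : List Int) : Prop :=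
  ∀ i, i < combi.length → combi.getD i 0 = 1 →
    i < tab_atom.length ∧ i < matrix_bonds.length ∧
    ∀ j, j < combi.length → combi.getD j 0 = 1 → j < (matrix_bonds.getD i []).length
instance (matrix_bonds : List (List Int)) (tab_atom : List String) (combi : List Int) : Decidable (Pre_convert_combi matrix_bonds tab_atom combi) := by unfold Pre_convert_combi; infer_instance
def pvWitness_convert_combi : List (List Int) × List String × List Int := ([[0, 1, 2], [1, 0, 3], [2, 3, 0]], ["C", "O", "H"], [1, 0, 1])

def Spec_convert_combi (matrix_bonds : List (List Int)) (tab_atom : List String) (combi : List Int) (out : List (List Int) × List String) : Prop := out = convert_combi_alt matrix_bonds tab_atom combi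
instance (matrix_bonds : List (List Int)) (tab_atom : List String) (combi : List Int) (out : List (List Int) × List String) : Decidable (Spec_convert_combi matrix_bonds tab_atom combi out) := by unfold Spec_convert_combi; infer_instance

-- ===== CLAIM (what is proved, stated in full; the proofs are below) =====
def Claim_equal_convert_combi : Prop := ∀ (matrix_bonds : List (List Int)) (tab_atom : List String) (combi : List Int), Dom_convert_combi matrix_bonds tab_atom combi → Pre_convert_combi matrix_bonds tab_atom combi → Spec_convert_combi matrix_bonds tab_atom combi (convert_combi matrix_bonds tab_atom combi)

-- ===== LEMMAS AND PROOFS =====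

-- an append-if fold collects exactly the filtered, mapped elements
theorem pv_foldl_append_if {α β : Type} (p : α → Bool) (h : α → β) :
    ∀ (l : List α) (acc : List β),
      l.foldl (fun a j => if p j then a ++ [h j] else a) acc = acc ++ (l.filter p).map h := by
  intro l
  induction l with
  | nil => intro acc; simp
  | cons x xs ih =>
      intro acc
      by_cases hp : p x <;> simp [List.foldl, hp, ih]

-- the outer pair-valued fold collects the filtered, mapped rows and atoms
theorem pv_foldl_pair (p : Nat → Bool) (f : Nat → List Int) (g : Nat → String) :
    ∀ (l : List Nat) (a1 : List (List Int)) (a2 : List String),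
      l.foldl (fun (st : List (List Int) × List String) i =>
          if p i then (st.1 ++ [f i], st.2 ++ [g i]) else st) (a1, a2)
        = (a1 ++ (l.filter p).map f, a2 ++ (l.filter p).map g) := by
  intro l
  induction l with
  | nil => intro a1 a2; simp
  | cons x xs ih =>
      intro a1 a2
      by_cases hp : p x <;> simp [List.foldl, hp, ih]

-- pvKeep as a filtered-index map
theorem pvKeep_eq {α : Type} (d : α) :
    ∀ (l : List α) (c : List Int),
      pvKeep l c
        = ((List.range (min l.length c.length)).filter (fun i => c.getD i 0 = 1)).map
            (fun i => l.getD i d) := by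
  intro l
  induction l with
  | nil => intro c; simp [pvKeep]
  | cons x xs ih =>
      intro c
      cases c with
      | nil => simp [pvKeep]
      | cons v vs =>
          have hL : pvKeep (x :: xs) (v :: vs) = (if v = 1 then [x] else []) ++ pvKeep xs vs := by
            by_cases hv : v = 1 <;> simp [pvKeep, hv]
          rw [hL, ih vs]
          have hmin : min (x :: xs).length (v :: vs).length = min xs.length vs.length + 1 := by
            simp [Nat.succ_min_succ]
          rw [hmin, List.range_succ_eq_map, List.filter_cons]
          by_cases hv : v = 1 <;>
            simp only [hv, if_true, if_false, decide_eq_true_eq, List.getD_cons_zero,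
              List.getD_cons_succ, List.filter_map, Function.comp_def, List.map_map,
              List.singleton_append, List.nil_append, List.map_cons, decide_true]

-- restricting the range does not change the filter when every selected index is small
theorem pv_filter_range_min (p : Nat → Bool) (m n : Nat)
    (h : ∀ i, i < n → p i → i < m) :
    (List.range (min m n)).filter p = (List.range n).filter p := by
  by_cases hle : n ≤ m
  · rw [Nat.min_eq_right hle]
  · have hlt : m < n := by omega
    rw [Nat.min_eq_left (Nat.le_of_lt hlt)]
    have : n = m + (n - m) := by omega
    rw [this, List.range_add, List.filter_append]
    have : ((List.range (n - m)).map (fun i => m + i)).filter p = [] := by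
      apply List.filter_eq_nil_iff.mpr
      intro a ha
      simp only [List.mem_map, List.mem_range] at ha
      obtain ⟨i, hi, rfl⟩ := ha
      intro hp
      have := h (m + i) (by omega) hp
      omega
    rw [this, List.append_nil]

-- lower bound for pvMinLen
theorem pv_foldl_min_ge (j a : Nat) :
    ∀ (l : List (List Int)), j < a → (∀ r ∈ l, j < r.length) →
      j < l.foldl (fun m r' => min m r'.length) a := by
  intro l
  induction l generalizing a with
  | nil => intro ha _; simpa using ha
  | cons r rs ih =>
      intro ha hall
      simp only [List.foldl]
      exact ih _ (by have := hall r (by simp); omega)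
        (fun r' hr' => hall r' (by simp [hr']))

theorem pvMinLen_ge (j : Nat) (rs : List (List Int)) (hne : rs ≠ [])
    (h : ∀ r ∈ rs, j < r.length) : j < pvMinLen rs := by
  cases rs with
  | nil => exact absurd rfl hne
  | cons r rest =>
      exact pv_foldl_min_ge j r.length rest (h r (by simp))
        (fun r' hr' => h r' (by simp [hr']))

-- pvMinLen of a list of equal-length rows
theorem pv_foldl_min_const (L : Nat) :
    ∀ (l : List (List Int)), (∀ r ∈ l, r.length = L) →
      l.foldl (fun m r' => min m r'.length) L = L := by
  intro l
  induction l with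
  | nil => intro _; rfl
  | cons r rs ih =>
      intro h
      simp only [List.foldl, h r (by simp), Nat.min_self]
      exact ih (fun r' hr' => h r' (by simp [hr']))

theorem pvMinLen_const (rs : List (List Int)) (L : Nat) (hne : rs ≠ [])
    (h : ∀ r ∈ rs, r.length = L) : pvMinLen rs = L := by
  cases rs with
  | nil => exact absurd rfl hne
  | cons r rest =>
      show rest.foldl (fun m r' => min m r'.length) r.length = L
      rw [h r (by simp)]
      exact pv_foldl_min_const L rest (fun r' hr' => h r' (by simp [hr']))

-- element of pvTranspose at an in-range index
theorem pvTranspose_getD (rs : List (List Int)) (j : Nat) (hj : j < pvMinLen rs) :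
    (pvTranspose rs).getD j [] = rs.map (fun r => r.getD j 0) := by
  unfold pvTranspose
  rw [List.getD_eq_getElem _ _ (by simpa using hj)]
  simp

theorem pvTranspose_length (rs : List (List Int)) :
    (pvTranspose rs).length = pvMinLen rs := by
  simp [pvTranspose]

-- ===== VERDICT (by name: the statement is the Claim_ definition above) =====
theorem convert_combi_spec : Claim_equal_convert_combi := by
  intro M T c _ hpre
  unfold Spec_convert_combi
  set n := c.length with hn
  set p : Nat → Bool := fun i => decide (c.getD i 0 = 1) with hp
  set sel : List Nat := (List.range n).filter p with hsel
  have hselmem : ∀ i ∈ sel, i < n ∧ c.getD i 0 = 1 := by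
    intro i hi
    rw [hsel, List.mem_filter, List.mem_range] at hi
    exact ⟨hi.1, by simpa [hp] using hi.2⟩
  -- A's value
  have hfun : (fun (st : List (List Int) × List String) i =>
      if c.getD i 0 = 1 then
        (st.1 ++ [(List.range n).foldl
          (fun (acc : List Int) j =>
            if c.getD j 0 = 1 then acc ++ [(M.getD i []).getD j 0] else acc) []],
         st.2 ++ [T.getD i ""])
      else st)
      = (fun (st : List (List Int) × List String) i =>
      if p i then
        (st.1 ++ [(List.range n).foldl
          (fun (acc : List Int) j =>
            if c.getD j 0 = 1 then acc ++ [(M.getD i []).getD j 0] else acc) []],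
         st.2 ++ [T.getD i ""])
      else st) := by
    funext st i; simp [hp]
  have houter := pv_foldl_pair p
      (fun i => (List.range n).foldl
          (fun (acc : List Int) j =>
            if c.getD j 0 = 1 then acc ++ [(M.getD i []).getD j 0] else acc) [])
      (fun i => T.getD i "") (List.range n) [] []
  simp only [List.nil_append] at houter
  have hA : convert_combi M T c
      = (sel.map (fun i => sel.map (fun j => (M.getD i []).getD j 0)), sel.map (fun i => T.getD i "")) := by
    unfold convert_combi
    simp only [← hn, hfun, houter, ← hsel]
    refine Prod.ext_iff.mpr ⟨?_, rfl⟩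
    apply List.map_congr_left
    intro i _
    have hinner := pv_foldl_append_if p (fun j => (M.getD i []).getD j 0) (List.range n) []
    have hfin : (fun (acc : List Int) j =>
        if c.getD j 0 = 1 then acc ++ [(M.getD i []).getD j 0] else acc)
        = (fun (acc : List Int) j => if p j then acc ++ [(M.getD i []).getD j 0] else acc) := by
      funext acc j; simp [hp]
    rw [hfin, hinner]
    simp [hsel]
  have halt : convert_combi_alt M T c
      = (pvTranspose (pvKeep (pvTranspose (pvKeep M c)) c), pvKeep T c) := rfl
  rw [hA, halt]
  -- B's value
  have hkeepT : pvKeep T c = sel.map (fun i => T.getD i "") := by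
    rw [pvKeep_eq ""]
    congr 1
    rw [hsel, hn]
    exact pv_filter_range_min p T.length n
      (fun i hi hpi => (hpre i hi (by simpa [hp] using hpi)).1)
  have hrows : pvKeep M c = sel.map (fun i => M.getD i []) := by
    rw [pvKeep_eq []]
    congr 1
    rw [hsel, hn]
    exact pv_filter_range_min p M.length n
      (fun i hi hpi => (hpre i hi (by simpa [hp] using hpi)).2.1)
  cases hselc : sel with
  | nil =>
      have hrows0 : pvKeep M c = [] := by rw [hrows, hselc]; rfl
      rw [hrows0, hkeepT, hselc]
      have h1 : pvTranspose [] = [] := by simp [pvTranspose, pvMinLen]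
      rw [h1]
      have h2 : pvKeep ([] : List (List Int)) c = [] := rfl
      rw [h2, h1]
      simp
  | cons s0 srest =>
      rw [← hselc]
      -- every selected column index is below the minimum selected-row length
      have hjlt : ∀ j ∈ sel, j < pvMinLen (pvKeep M c) := by
        intro j hj
        apply pvMinLen_ge
        · rw [hrows, hselc]; simp
        · rw [hrows]
          intro r hr
          rw [List.mem_map] at hr
          obtain ⟨i, hi, rfl⟩ := hr
          obtain ⟨hin, hci⟩ := hselmem i hi
          obtain ⟨hjn, hcj⟩ := hselmem j hj
          exact (hpre i hin hci).2.2 j hjn hcj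
      have hcols : pvKeep (pvTranspose (pvKeep M c)) c
          = sel.map (fun j => sel.map (fun i => (M.getD i []).getD j 0)) := by
        rw [pvKeep_eq ([] : List Int)]
        have hfilt : (List.range (min (pvTranspose (pvKeep M c)).length n)).filter p = sel := by
          rw [hsel, hn]
          exact pv_filter_range_min p (pvTranspose (pvKeep M c)).length n
            (fun j hj hpj => by
              rw [pvTranspose_length]
              exact hjlt j (by rw [hsel]; exact List.mem_filter.mpr ⟨List.mem_range.mpr hj, hpj⟩))
        rw [hfilt]
        apply List.map_congr_left
        intro j hj
        rw [pvTranspose_getD _ _ (hjlt j hj), hrows, List.map_map]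
        rfl
      rw [hcols, hkeepT]
      refine Prod.ext_iff.mpr ⟨?_, rfl⟩
      -- transpose of the rectangular k×k block
      have hmin : pvMinLen (sel.map (fun j => sel.map (fun i => (M.getD i []).getD j 0))) = sel.length := by
        apply pvMinLen_const
        · rw [hselc]; simp
        · intro r hr
          rw [List.mem_map] at hr
          obtain ⟨j, _, rfl⟩ := hr
          simp
      unfold pvTranspose
      rw [hmin]
      apply List.ext_getElem
      · simp
      · intro a h1 h2
        simp only [List.getElem_map, List.getElem_range]
        have ha : a < sel.length := by simpa using h1
        rw [List.map_map]
        apply List.map_congr_left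
        intro j _
        simp only [Function.comp]
        conv_rhs => rw [List.getD_eq_getElem _ _ (by simpa using ha)]
        simp
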